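-- pv_equiv track=rewrite | github.com/ghkdxodn84-oss/KORStockScan | src/engine/sniper_overnight_gatekeeper.py | _clean_telegram_text
-- ===== SOURCE A (Python) =====
-- def _clean_telegram_text(text) -> str:
--     # Markdown 이스케이프 흔적(예: \\(, \\., \\])을 사람이 읽기 쉬운 일반 문자열로 복원
--     cleaned = str(text or "")
--     replacements = {
--         r"\(": "(",
--         r"\)": ")",
--         r"\[": "[",
--         r"\]": "]",
--         r"\.": ".",
--         r"\_": "_",
--         r"\-": "-",
--         r"\+": "+",
--     }
--     for src, dst in replacements.items():
--         cleaned = cleaned.replace(src, dst)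
--     return cleaned
-- ===== SOURCE B (Python) =====
-- SPECIALS = "()[]._-+"
--
-- def _clean_telegram_text(text) -> str:
--     # Single left-to-right scan undoing markdown escapes, instead of eight replace passes.
--     s = str(text or "")
--     out = []
--     i = 0
--     n = len(s)
--     while i < n:
--         if s[i] == "\\" and i + 1 < n and s[i + 1] in SPECIALS:
--             out.append(s[i + 1])
--             i += 2
--         else:
--             out.append(s[i])
--             i += 1
--     return "".join(out)
-- ===== Notes on version B (the rewrite author's own statement) =====
-- stated objective: simpler
-- what changed: Replaced the eight sequential .replace passes (one full scan of the string per escaped character) with a single left-to-right scan that un-escapes a backslash whenever the next character is in the special set.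
import Mathlib
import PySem

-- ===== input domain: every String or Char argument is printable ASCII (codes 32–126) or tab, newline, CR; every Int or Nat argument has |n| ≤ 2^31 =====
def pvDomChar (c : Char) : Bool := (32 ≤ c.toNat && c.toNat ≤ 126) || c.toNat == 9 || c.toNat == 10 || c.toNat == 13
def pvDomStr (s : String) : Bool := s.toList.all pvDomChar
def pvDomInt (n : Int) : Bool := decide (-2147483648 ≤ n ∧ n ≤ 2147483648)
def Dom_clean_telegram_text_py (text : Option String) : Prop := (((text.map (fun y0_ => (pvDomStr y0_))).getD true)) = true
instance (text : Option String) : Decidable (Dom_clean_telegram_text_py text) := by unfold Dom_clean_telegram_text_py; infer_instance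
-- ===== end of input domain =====

-- B replaces A's eight sequential `.replace` passes by one left-to-right scan that un-escapes
-- any backslash followed by a special character (objective: simpler, one pass).

-- ===== PORT A =====
-- str(text or ""): None and "" are falsy → "", otherwise the string itself
def pvCoerce (text : Option String) : String :=
  match text with
  | none => ""
  | some s => if s = "" then "" else s

def clean_telegram_text_py (text : Option String) : String :=
  let cleaned := pvCoerce text
  let replacements : PySem.Dict String String :=
    PySem.Dict.ofList
      [("\\(", "("), ("\\)", ")"), ("\\[", "["), ("\\]", "]"),
       ("\\.", "."), ("\\_", "_"), ("\\-", "-"), ("\\+", "+")]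
  (PySem.Dict.items replacements).foldl (fun acc p => PySem.Str.replace acc p.1 p.2) cleaned

-- ===== PORT B =====
def pvSpecials : List Char := ['(', ')', '[', ']', '.', '_', '-', '+']

-- one pass: a backslash followed by a special char emits the special char and skips both
def pvScan (S : List Char) : List Char → List Char
  | [] => []
  | [x] => [x]
  | x :: y :: t =>
    if x = '\\' ∧ y ∈ S then y :: pvScan S t
    else x :: pvScan S (y :: t)

def clean_telegram_text_py_alt (text : Option String) : String :=
  let s := pvCoerce text
  String.ofList (pvScan pvSpecials s.toList)

-- ===== PRECONDITION & SPEC =====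
def Spec_clean_telegram_text_py (text : Option String) (out : String) : Prop := out = clean_telegram_text_py_alt text
instance (text : Option String) (out : String) : Decidable (Spec_clean_telegram_text_py text out) := by unfold Spec_clean_telegram_text_py; infer_instance

-- ===== CLAIM (what is proved, stated in full; the proofs are below) =====
def Claim_equal_clean_telegram_text_py : Prop := ∀ (text : Option String), Dom_clean_telegram_text_py text → Spec_clean_telegram_text_py text (clean_telegram_text_py text)

-- ===== LEMMAS AND PROOFS =====

-- recursive characterisation of one replace pass for a two-char pattern '\c' → 'c'
def pvRepl1 (c : Char) : List Char → List Char
  | [] => []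
  | [x] => [x]
  | x :: y :: t =>
    if x = '\\' ∧ y = c then c :: pvRepl1 c t
    else x :: pvRepl1 c (y :: t)

theorem pvReplaceGo_eq (c : Char) :
    ∀ (fuel : Nat) (l acc : List Char), l.length ≤ fuel →
      PySem.Chars.replace.go ['\\', c] [c] fuel l acc = acc.reverse ++ pvRepl1 c l := by
  intro fuel
  induction fuel with
  | zero =>
    intro l acc h
    have : l = [] := List.length_eq_zero_iff.mp (Nat.le_zero.mp h)
    subst this
    simp [PySem.Chars.replace.go, pvRepl1]
  | succ f ih =>
    intro l acc h
    match l with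
    | [] => simp [PySem.Chars.replace.go, pvRepl1]
    | [x] =>
      have hpre : List.isPrefixOf ['\\', c] [x] = false := by
        simp [List.isPrefixOf]
      simp only [PySem.Chars.replace.go, hpre, Bool.false_eq_true, if_false]
      rw [ih [] (x :: acc) (by simp)]
      simp [pvRepl1]
    | x :: y :: t =>
      by_cases hx : x = '\\' ∧ y = c
      · obtain ⟨hx1, hy1⟩ := hx
        have hpre : List.isPrefixOf ['\\', c] (x :: y :: t) = true := by
          simp [List.isPrefixOf, hx1, hy1]
        simp only [PySem.Chars.replace.go, hpre]
        simp only [if_true]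
        have hdrop : List.drop (['\\', c].length) (x :: y :: t) = t := rfl
        rw [hdrop]
        rw [ih t ([c].reverse ++ acc) (by simp at h ⊢; omega)]
        simp [pvRepl1, hx1, hy1]
      · have hpre : List.isPrefixOf ['\\', c] (x :: y :: t) = false := by
          simp [List.isPrefixOf]
          intro h1 h2
          exact absurd ⟨h1.symm, h2.symm⟩ hx
        simp only [PySem.Chars.replace.go, hpre, Bool.false_eq_true, if_false]
        rw [ih (y :: t) (x :: acc) (by simp at h ⊢; omega)]
        simp [pvRepl1, hx]

theorem pvReplace_eq (c : Char) (cs : List Char) :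
    PySem.Chars.replace cs ['\\', c] [c] = pvRepl1 c cs := by
  rw [PySem.Chars.replace]
  simp only [List.isEmpty_cons, Bool.false_eq_true, if_false]
  rw [pvReplaceGo_eq c cs.length cs [] (le_refl _)]
  simp


theorem pvScan_nil_specials (cs : List Char) : pvScan [] cs = cs := by
  fun_induction pvScan [] cs with
  | case1 => rfl
  | case2 => rfl
  | case3 x y t h ih => simp at h
  | case4 x y t h ih => rw [ih]

theorem pvScan_cons_ne (S : List Char) (x : Char) (hx : x ≠ '\\') (xs : List Char) :
    pvScan S (x :: xs) = x :: pvScan S xs := by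
  match xs with
  | [] => rfl
  | y :: t => simp [pvScan, hx]

theorem pvScan_backslash_cons (S : List Char) (zs : List Char)
    (h : ∀ d, zs.head? = some d → d ∉ S) :
    pvScan S ('\\' :: zs) = '\\' :: pvScan S zs := by
  match zs with
  | [] => rfl
  | d :: t =>
    have hd : d ∉ S := h d rfl
    simp [pvScan, hd]

-- head of a replace pass: either the pattern's plain char or the original head
theorem pvRepl1_head (c : Char) (xs : List Char) :
    (pvRepl1 c xs).head? = some c ∨ (pvRepl1 c xs).head? = xs.head? := by
  match xs with
  | [] => right; rfl
  | [x] => right; rfl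
  | x :: y :: t =>
    by_cases h : x = '\\' ∧ y = c
    · left; simp [pvRepl1, h]
    · right; simp [pvRepl1, h]

-- key lemma: scanning over S after one replace pass for c equals scanning over c :: S
theorem pvScan_repl1 (c : Char) (S : List Char) (hc : c ≠ '\\') (hcS : c ∉ S)
    (hS : '\\' ∉ S) : ∀ (cs : List Char), pvScan S (pvRepl1 c cs) = pvScan (c :: S) cs := by
  have H : ∀ (n : Nat) (cs : List Char), cs.length ≤ n →
      pvScan S (pvRepl1 c cs) = pvScan (c :: S) cs := by
    intro n
    induction n with
    | zero =>
      intro cs h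
      have : cs = [] := List.length_eq_zero_iff.mp (Nat.le_zero.mp h)
      subst this; rfl
    | succ n ih =>
      intro cs h
      match cs with
      | [] => rfl
      | [x] => rfl
      | x :: y :: t =>
        by_cases hx : x = '\\'
        · subst hx
          by_cases hy : y = c
          · -- both sides consume the pair
            have h1 : pvRepl1 c ('\\' :: y :: t) = c :: pvRepl1 c t := by
              simp [pvRepl1, hy]
            rw [h1, pvScan_cons_ne S c hc, ih t (by simp at h ⊢; omega)]
            simp [pvScan, hy]
          · have hr : pvRepl1 c ('\\' :: y :: t) = '\\' :: pvRepl1 c (y :: t) := by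
              simp [pvRepl1, hy]
            rw [hr]
            by_cases hyS : y ∈ S
            · -- pair '\y', y ∈ S: both sides consume it
              have hyb : y ≠ '\\' := fun he => hS (he ▸ hyS)
              have h2 : pvRepl1 c (y :: t) = y :: pvRepl1 c t := by
                match t with
                | [] => rfl
                | z :: t' => simp [pvRepl1, hyb]
              rw [h2]
              have h3 : pvScan S ('\\' :: y :: pvRepl1 c t) = y :: pvScan S (pvRepl1 c t) := by
                simp [pvScan, hyS]
              rw [h3, ih t (by simp at h ⊢; omega)]
              have : pvScan (c :: S) ('\\' :: y :: t) = y :: pvScan (c :: S) t := by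
                simp [pvScan, hyS]
              rw [this]
            · -- the backslash survives on both sides
              have hhead : ∀ d, (pvRepl1 c (y :: t)).head? = some d → d ∉ S := by
                intro d hd
                rcases pvRepl1_head c (y :: t) with h' | h'
                · rw [h'] at hd; injection hd with hd; exact hd ▸ hcS
                · rw [h'] at hd; simp at hd; exact hd ▸ hyS
              rw [pvScan_backslash_cons S _ hhead, ih (y :: t) (by simp at h ⊢; omega)]
              have hynS : y ∉ c :: S := by simp [hy, hyS]
              have : pvScan (c :: S) ('\\' :: y :: t) = '\\' :: pvScan (c :: S) (y :: t) := by
                simp [pvScan, hy, hyS]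
              rw [this]
        · have hr : pvRepl1 c (x :: y :: t) = x :: pvRepl1 c (y :: t) := by
            simp [pvRepl1, hx]
          rw [hr, pvScan_cons_ne S x hx, ih (y :: t) (by simp at h ⊢; omega),
              pvScan_cons_ne (c :: S) x hx]
  exact fun cs => H cs.length cs (le_refl _)

theorem pvChain : ∀ (S : List Char), '\\' ∉ S → S.Nodup → ∀ (cs : List Char),
    List.foldl (fun acc c => pvRepl1 c acc) cs S = pvScan S cs := by
  intro S
  induction S with
  | nil => intro _ _ cs; simp [pvScan_nil_specials]
  | cons c S' ih =>
    intro hb hnd cs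
    simp only [List.foldl_cons]
    have hb' : '\\' ∉ S' := fun h => hb (List.mem_cons_of_mem _ h)
    have hc : c ≠ '\\' := fun h => hb (h ▸ List.mem_cons_self ..)
    have hcS : c ∉ S' := (List.nodup_cons.mp hnd).1
    rw [ih hb' (List.nodup_cons.mp hnd).2 (pvRepl1 c cs)]
    exact pvScan_repl1 c S' hc hcS hb' cs

theorem pvToList_A (text : Option String) :
    (clean_telegram_text_py text).toList =
      List.foldl (fun acc c => pvRepl1 c acc) (pvCoerce text).toList pvSpecials := by
  unfold clean_telegram_text_py
  have hitems : (PySem.Dict.ofList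
      [("\\(", "("), ("\\)", ")"), ("\\[", "["), ("\\]", "]"),
       ("\\.", "."), ("\\_", "_"), ("\\-", "-"), ("\\+", "+")] :
        PySem.Dict String String).items =
      [("\\(", "("), ("\\)", ")"), ("\\[", "["), ("\\]", "]"),
       ("\\.", "."), ("\\_", "_"), ("\\-", "-"), ("\\+", "+")] := by decide
  have l1 : ("\\(" : String).toList = ['\\', '('] := rfl
  have l2 : ("\\)" : String).toList = ['\\', ')'] := rfl
  have l3 : ("\\[" : String).toList = ['\\', '['] := rfl
  have l4 : ("\\]" : String).toList = ['\\', ']'] := rfl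
  have l5 : ("\\." : String).toList = ['\\', '.'] := rfl
  have l6 : ("\\_" : String).toList = ['\\', '_'] := rfl
  have l7 : ("\\-" : String).toList = ['\\', '-'] := rfl
  have l8 : ("\\+" : String).toList = ['\\', '+'] := rfl
  have r1 : ("(" : String).toList = ['('] := rfl
  have r2 : (")" : String).toList = [')'] := rfl
  have r3 : ("[" : String).toList = ['['] := rfl
  have r4 : ("]" : String).toList = [']'] := rfl
  have r5 : ("." : String).toList = ['.'] := rfl
  have r6 : ("_" : String).toList = ['_'] := rfl
  have r7 : ("-" : String).toList = ['-'] := rfl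
  have r8 : ("+" : String).toList = ['+'] := rfl
  simp only [hitems]
  simp only [List.foldl, PySem.Str.toList_replace, l1, l2, l3, l4, l5, l6, l7, l8,
    r1, r2, r3, r4, r5, r6, r7, r8, pvReplace_eq]
  simp [pvSpecials]

-- ===== VERDICT (by name: the statement is the Claim_ definition above) =====
theorem clean_telegram_text_py_spec : Claim_equal_clean_telegram_text_py := by
  intro text _
  unfold Spec_clean_telegram_text_py clean_telegram_text_py_alt
  have hA : (clean_telegram_text_py text).toList = pvScan pvSpecials (pvCoerce text).toList := by
    rw [pvToList_A, pvChain pvSpecials (by decide) (by decide)]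
  show clean_telegram_text_py text = String.ofList (pvScan pvSpecials (pvCoerce text).toList)
  rw [← hA]
  exact String.ofList_toList.symm
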